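-- pv_equiv track=rewrite | github.com/TR-Rafael/beecrowdPython | 1141/1141-GPT-Com-erros.py | check_farm_of_strings
-- ===== SOURCE A (Python) =====
-- def check_farm_of_strings(list_of_string_sorted):
--     n = len(list_of_string_sorted)
--     dp = [1] * n  # dp[i] will store the length of the longest chain ending with list_of_string_sorted[i]
--
--     for i in range(n):
--         for j in range(i):
--             if list_of_string_sorted[j] in list_of_string_sorted[i]:
--                 dp[i] = max(dp[i], dp[j] + 1)
--
--     return max(dp)
-- ===== SOURCE B (Python) =====
-- def check_farm_of_strings(list_of_string_sorted):
--     # Top-down memoized recursion: best(i) = longest chain ending at index i.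
--     memo = {}
--
--     def best(i):
--         if i in memo:
--             return memo[i]
--         longest = 1 + max((best(j) for j in range(i)
--                            if list_of_string_sorted[j] in list_of_string_sorted[i]),
--                           default=0)
--         memo[i] = longest
--         return longest
--
--     return max(best(i) for i in range(len(list_of_string_sorted)))
-- ===== Notes on version B (the rewrite author's own statement) =====
-- stated objective: alternative
-- what changed: Replaces A's bottom-up DP table with nested index loops and in-place dp[i] updates by a top-down memoized recursion best(i) (1 + max of best(j) over j<i whose string is a substring of string i), taking the max of best(i) over all i; same O(n^2) substring tests.
import Mathlib
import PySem

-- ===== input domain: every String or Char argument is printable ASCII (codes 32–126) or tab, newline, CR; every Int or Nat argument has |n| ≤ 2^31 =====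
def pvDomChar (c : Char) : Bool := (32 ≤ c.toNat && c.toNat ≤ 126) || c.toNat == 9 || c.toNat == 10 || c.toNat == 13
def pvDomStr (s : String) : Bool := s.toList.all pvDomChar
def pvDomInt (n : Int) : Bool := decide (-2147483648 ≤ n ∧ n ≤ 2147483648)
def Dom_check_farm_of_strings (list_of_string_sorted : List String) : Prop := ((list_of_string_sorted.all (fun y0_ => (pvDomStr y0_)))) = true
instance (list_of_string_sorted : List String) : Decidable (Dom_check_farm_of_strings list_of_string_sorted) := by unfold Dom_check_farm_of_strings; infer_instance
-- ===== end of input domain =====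

-- B replaces A's bottom-up in-place DP table with a top-down memoized recursion
-- best(i) over the substring DAG (objective: alternative decomposition, same O(n^2) substring tests).
-- Both A and B raise ValueError (max of an empty sequence) on [], excluded by Pre_.

-- ===== PORT A =====
-- Literal port of A: dp table of n ones, nested index loops updating dp[i] in place,
-- then max(dp) (Pre_ excludes the empty list, where Python's max raises ValueError).
def check_farm_of_strings (list_of_string_sorted : List String) : Int :=
  let n := list_of_string_sorted.length
  let dp : List Int := List.replicate n 1
  let dp := (List.range n).foldl (fun dp i =>
      (List.range i).foldl (fun dp j =>
          if PySem.Str.isIn (list_of_string_sorted.getD j "") (list_of_string_sorted.getD i "") then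
            dp.set i (max (dp.getD i 0) (dp.getD j 0 + 1))
          else dp) dp) dp
  match PySem.List.max? dp (fun y => y) with
  | some v => v
  | none => 0   -- unreachable under Pre_ (Python raises ValueError on [])

-- ===== PORT B =====
-- best(i) with the memo dict threaded through the recursion, as in Source B:
-- memo hit returns the cached value; otherwise 1 + max(best(j) for eligible j < i, default 0).
-- Structural fuel (= i; recursive calls have j < i ≤ fuel) makes the recursion kernel-reducible;
-- under that invariant the fuel never runs out, so this is exactly Source B's recursion.
def bestMemoGo (xs : List String) : Nat → Nat → PySem.Dict Nat Int → Int × PySem.Dict Nat Int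
  | 0, i, memo =>
    (match PySem.Dict.get? memo i with
     | some v => (v, memo)
     | none => (1, PySem.Dict.insert memo i 1))   -- i = 0: no j < i, so best(i) = 1 + max((), default=0)
  | fuel + 1, i, memo =>
    match PySem.Dict.get? memo i with
    | some v => (v, memo)
    | none =>
      let p := (List.range i).foldl
        (fun (acc : Int × PySem.Dict Nat Int) j =>
          if PySem.Str.isIn (xs.getD j "") (xs.getD i "") then
            let q := bestMemoGo xs fuel j acc.2
            (max acc.1 q.1, q.2)
          else acc) (0, memo)
      let r := 1 + p.1
      (r, PySem.Dict.insert p.2 i r)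

def bestMemo (list_of_string_sorted : List String) (i : Nat)
    (memo : PySem.Dict Nat Int) : Int × PySem.Dict Nat Int :=
  bestMemoGo list_of_string_sorted i i memo

def check_farm_of_strings_alt (list_of_string_sorted : List String) : Int :=
  let r := (List.range list_of_string_sorted.length).foldl
    (fun (acc : Option Int × PySem.Dict Nat Int) i =>
      let q := bestMemo list_of_string_sorted i acc.2
      (some (match acc.1 with | none => q.1 | some m => max m q.1), q.2))
    (none, PySem.Dict.empty)
  r.1.getD 0   -- none only for the empty list, where Python's max raises ValueError (outside Pre_)

-- ===== PRECONDITION & SPEC =====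
-- Pre_ excludes exactly the empty list: there both A and B raise ValueError (max() of an empty sequence).
def Pre_check_farm_of_strings (list_of_string_sorted : List String) : Prop :=
  list_of_string_sorted ≠ []
instance (list_of_string_sorted : List String) : Decidable (Pre_check_farm_of_strings list_of_string_sorted) := by unfold Pre_check_farm_of_strings; infer_instance

def pvWitness_check_farm_of_strings : List String := ["b", "ab", "xabx"]

def Spec_check_farm_of_strings (list_of_string_sorted : List String) (out : Int) : Prop := out = check_farm_of_strings_alt list_of_string_sorted
instance (list_of_string_sorted : List String) (out : Int) : Decidable (Spec_check_farm_of_strings list_of_string_sorted out) := by unfold Spec_check_farm_of_strings; infer_instance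

-- ===== CLAIM (what is proved, stated in full; the proofs are below) =====
def Claim_equal_check_farm_of_strings : Prop := ∀ (list_of_string_sorted : List String), Dom_check_farm_of_strings list_of_string_sorted → Pre_check_farm_of_strings list_of_string_sorted → Spec_check_farm_of_strings list_of_string_sorted (check_farm_of_strings list_of_string_sorted)

-- ===== LEMMAS AND PROOFS =====

-- the substring test both programs share, as a named predicate for the proofs
def subt (xs : List String) (i j : Nat) : Bool :=
  PySem.Str.isIn (xs.getD j "") (xs.getD i "")

-- pure (memo-free) value of B's best(i)
def bestP (xs : List String) (i : Nat) : Int :=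
  1 + (List.range i).attach.foldl
    (fun (a : Int) jh => if subt xs i jh.1 then max a (bestP xs jh.1) else a) 0
termination_by i
decreasing_by exact List.mem_range.mp jh.2

theorem bestP_eq (xs : List String) (i : Nat) :
    bestP xs i = 1 + (List.range i).foldl
      (fun (a : Int) j => if subt xs i j then max a (bestP xs j) else a) 0 := by
  rw [bestP]
  exact congrArg (fun t => 1 + t)
    (List.foldl_attach (f := fun (a : Int) j => if subt xs i j then max a (bestP xs j) else a)
      (b := 0) (l := List.range i))

def MemoOK (xs : List String) (m : PySem.Dict Nat Int) : Prop :=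
  ∀ k v, PySem.Dict.get? m k = some v → v = bestP xs k

theorem memoOK_empty (xs : List String) : MemoOK xs PySem.Dict.empty := by
  intro k v h; simp [PySem.Dict.get?, PySem.Dict.empty] at h

theorem bestMemoGo_spec (xs : List String) :
    ∀ fuel i m, i ≤ fuel → MemoOK xs m →
      (bestMemoGo xs fuel i m).1 = bestP xs i ∧ MemoOK xs (bestMemoGo xs fuel i m).2 := by
  intro fuel
  induction fuel with
  | zero =>
    intro i m hi hm
    interval_cases i
    rw [bestMemoGo]
    cases hg : PySem.Dict.get? m 0 with
    | some v => simpa [hg] using ⟨hm 0 v hg, hm⟩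
    | none =>
      have h0 : bestP xs 0 = 1 := by rw [bestP_eq]; simp
      refine ⟨by simp [h0], ?_⟩
      intro k v hkv
      rw [PySem.Dict.get?_insert] at hkv
      split_ifs at hkv with hk
      · cases hkv; subst hk; omega
      · exact hm k v hkv
  | succ fuel IH =>
    intro i m hi hm
    rw [bestMemoGo]
    cases hg : PySem.Dict.get? m i with
    | some v => simpa [hg] using ⟨hm i v hg, hm⟩
    | none =>
      have key : ∀ (l : List Nat), (∀ j ∈ l, j ≤ fuel) → ∀ (a : Int) (mm : PySem.Dict Nat Int),
          MemoOK xs mm →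
          (l.foldl (fun (acc : Int × PySem.Dict Nat Int) j =>
              if PySem.Str.isIn (xs.getD j "") (xs.getD i "") then
                (max acc.1 (bestMemoGo xs fuel j acc.2).1, (bestMemoGo xs fuel j acc.2).2)
              else acc) (a, mm)).1
            = l.foldl (fun (a : Int) j => if subt xs i j then max a (bestP xs j) else a) a
          ∧ MemoOK xs
            (l.foldl (fun (acc : Int × PySem.Dict Nat Int) j =>
              if PySem.Str.isIn (xs.getD j "") (xs.getD i "") then
                (max acc.1 (bestMemoGo xs fuel j acc.2).1, (bestMemoGo xs fuel j acc.2).2)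
              else acc) (a, mm)).2 := by
        intro l
        induction l with
        | nil => intro _ a mm hmm; exact ⟨rfl, hmm⟩
        | cons j t ihl =>
          intro hl a mm hmm
          have hj : j ≤ fuel := hl j (List.mem_cons_self ..)
          have ht : ∀ x ∈ t, x ≤ fuel := fun x hx => hl x (List.mem_cons_of_mem _ hx)
          by_cases hc : subt xs i j = true
          · have hc' : PySem.Str.isIn (xs.getD j "") (xs.getD i "") = true := hc
            obtain ⟨hv, hmOK⟩ := IH j mm hj hmm
            simp only [List.foldl_cons, hc', if_true, hc]
            rw [← hv]
            exact ihl ht (max a (bestMemoGo xs fuel j mm).1) (bestMemoGo xs fuel j mm).2 hmOK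
          · have hc' : PySem.Str.isIn (xs.getD j "") (xs.getD i "") = false := by
              simpa [subt] using hc
            simp only [List.foldl_cons, hc', hc]
            exact ihl ht a mm hmm
      obtain ⟨h1, h2⟩ := key (List.range i)
        (fun j hj => by have := List.mem_range.mp hj; omega) 0 m hm
      constructor
      · simp only [h1]; rw [bestP_eq]
      · intro k v hkv
        rw [PySem.Dict.get?_insert] at hkv
        split_ifs at hkv with hk
        · cases hkv
          subst hk
          rw [bestP_eq, h1]
        · exact h2 k v hkv

theorem bestMemo_spec (xs : List String) :
    ∀ i m, MemoOK xs m →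
      (bestMemo xs i m).1 = bestP xs i ∧ MemoOK xs (bestMemo xs i m).2 :=
  fun i m hm => bestMemoGo_spec xs i i m le_rfl hm

-- A's inner loop = set dp[i] to a pure fold over the untouched dp[j]
theorem innerA (xs : List String) (i : Nat) :
    ∀ (l : List Nat), (∀ j ∈ l, j ≠ i) → ∀ (dp : List Int), i < dp.length →
      l.foldl (fun (dp : List Int) j =>
          if PySem.Str.isIn (xs.getD j "") (xs.getD i "") then
            dp.set i (max (dp.getD i 0) (dp.getD j 0 + 1))
          else dp) dp
        = dp.set i (l.foldl (fun (a : Int) j =>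
            if subt xs i j then max a (dp.getD j 0 + 1) else a) (dp.getD i 0)) := by
  intro l
  induction l with
  | nil =>
    intro _ dp hi
    simp only [List.foldl_nil]
    rw [List.getD_eq_getElem?_getD, List.getElem?_eq_getElem hi]
    simp [List.set_getElem_self hi]
  | cons j t ihl =>
    intro hl dp hi
    have hj : j ≠ i := hl j (List.mem_cons_self ..)
    have ht : ∀ x ∈ t, x ≠ i := fun x hx => hl x (List.mem_cons_of_mem _ hx)
    by_cases hc : subt xs i j = true
    · have hc' : PySem.Str.isIn (xs.getD j "") (xs.getD i "") = true := hc
      simp only [List.foldl_cons, hc', if_true, hc]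
      set dp' := dp.set i (max (dp.getD i 0) (dp.getD j 0 + 1)) with hdp'
      have hlen : i < dp'.length := by simpa [hdp'] using hi
      rw [ihl ht dp' hlen]
      have hget : ∀ k, k ≠ i → dp'.getD k 0 = dp.getD k 0 := by
        intro k hk
        rw [hdp', List.getD_eq_getElem?_getD, List.getElem?_set_ne (by omega),
          ← List.getD_eq_getElem?_getD]
      have hgeti : dp'.getD i 0 = max (dp.getD i 0) (dp.getD j 0 + 1) := by
        rw [hdp', List.getD_eq_getElem?_getD, List.getElem?_set_self' ]
        · simp [hi]
      rw [hdp', List.set_set, hgeti]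
      congr 1
      exact PySem.List.foldl_congr_mem _ _ _ _
        (fun a x hx => by rw [hget x (ht x hx)])
    · have hc' : PySem.Str.isIn (xs.getD j "") (xs.getD i "") = false := by
        simpa [subt] using hc
      simp only [List.foldl_cons, hc', hc]
      exact ihl ht dp hi

-- shift: starting the running max at 1+a over (f j + 1) = 1 + starting at a over f j
theorem shiftFold (xs : List String) (i : Nat) (f : Nat → Int) :
    ∀ (l : List Nat) (a : Int),
      l.foldl (fun (b : Int) j => if subt xs i j then max b (f j + 1) else b) (1 + a)
        = 1 + l.foldl (fun (b : Int) j => if subt xs i j then max b (f j) else b) a := by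
  intro l
  induction l with
  | nil => intro a; rfl
  | cons j t ihl =>
    intro a
    by_cases hc : subt xs i j = true
    · simp only [List.foldl_cons, hc, if_true]
      rw [show max (1 + a) (f j + 1) = 1 + max a (f j) by
        rw [show f j + 1 = 1 + f j by ring, max_add_add_left]]
      exact ihl _
    · simp only [List.foldl_cons, hc, Bool.false_eq_true, if_false]
      exact ihl a

-- A's dp after the first m outer iterations
theorem outerA (xs : List String) :
    ∀ m, m ≤ xs.length →
      (List.range m).foldl (fun (dp : List Int) i =>
          (List.range i).foldl (fun (dp : List Int) j =>
              if PySem.Str.isIn (xs.getD j "") (xs.getD i "") then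
                dp.set i (max (dp.getD i 0) (dp.getD j 0 + 1))
              else dp) dp) (List.replicate xs.length 1)
        = (List.range xs.length).map (fun k => if k < m then bestP xs k else 1) := by
  intro m
  induction m with
  | zero =>
    intro _
    simp only [List.range_zero, List.foldl_nil, Nat.not_lt_zero, if_false]
    simp [List.map_const']
  | succ m ih =>
    intro hm
    rw [List.range_succ, List.foldl_append, ih (by omega), List.foldl_cons, List.foldl_nil]
    set dp := (List.range xs.length).map (fun k => if k < m then bestP xs k else 1) with hdp
    have hlen : m < dp.length := by simp [hdp]; omega
    rw [innerA xs m (List.range m) (fun j hj => by have := List.mem_range.mp hj; omega) dp hlen]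
    have hgetk : ∀ k, k < xs.length → dp.getD k 0 = (if k < m then bestP xs k else 1) := by
      intro k hk
      rw [hdp, List.getD_eq_getElem?_getD]
      rw [List.getElem?_map, List.getElem?_range hk]
      rfl
    have hgetm : dp.getD m 0 = 1 := by rw [hgetk m (by omega)]; simp
    rw [hgetm]
    have hcongr : (List.range m).foldl (fun (a : Int) j =>
          if subt xs m j then max a (dp.getD j 0 + 1) else a) 1
        = (List.range m).foldl (fun (a : Int) j =>
          if subt xs m j then max a (bestP xs j + 1) else a) 1 := by
      refine PySem.List.foldl_congr_mem _ _ _ _ (fun a x hx => ?_)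
      have hx' := List.mem_range.mp hx
      rw [hgetk x (by omega)]
      simp [hx']
    have hshift := shiftFold xs m (fun j => bestP xs j) (List.range m) 0
    rw [show (1:Int) + 0 = 1 from by ring] at hshift
    rw [hcongr, hshift, ← bestP_eq]
    -- now: dp.set m (bestP xs m) = map …
    apply List.ext_getElem
    · simp [hdp]
    · intro k hk1 hk2
      simp only [hdp, List.length_map, List.length_range] at hk1 hk2 ⊢
      rw [List.getElem_set]
      simp only [List.getElem_map, List.getElem_range]
      split_ifs <;> first | rfl | omega | (subst_vars; rfl)

-- the pure counterpart of one step of B's outer running-max fold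
def pureStep (xs : List String) (o : Option Int) (i : Nat) : Option Int :=
  some (match o with | none => bestP xs i | some w => max w (bestP xs i))

-- B's outer fold computes the pure running-max fold of bestP
theorem outerB (xs : List String) :
    ∀ (l : List Nat) (o : Option Int) (m : PySem.Dict Nat Int), MemoOK xs m →
      (l.foldl (fun (acc : Option Int × PySem.Dict Nat Int) i =>
          let q := bestMemo xs i acc.2
          (some (match acc.1 with | none => q.1 | some w => max w q.1), q.2))
        (o, m)).1
        = l.foldl (pureStep xs) o := by
  intro l
  induction l with
  | nil => intro o m _; rfl
  | cons i t ihl =>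
    intro o m hm
    obtain ⟨h1, h2⟩ := bestMemo_spec xs i m hm
    simp only [List.foldl_cons]
    rw [ihl _ _ h2, h1]
    rfl

theorem pureFold_some (xs : List String) :
    ∀ (l : List Nat) (v : Int),
      l.foldl (pureStep xs) (some v) = some (l.foldl (fun (a : Int) i => max a (bestP xs i)) v) := by
  intro l
  induction l with
  | nil => intro v; rfl
  | cons i t ihl => intro v; simp only [List.foldl_cons, pureStep]; exact ihl _

-- ===== VERDICT (by name: the statement is the Claim_ definition above) =====
theorem check_farm_of_strings_spec : Claim_equal_check_farm_of_strings := by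
  intro xs _ hpre
  unfold Spec_check_farm_of_strings check_farm_of_strings check_farm_of_strings_alt
  have hn : xs.length ≠ 0 := fun h => hpre (List.eq_nil_of_length_eq_zero h)
  obtain ⟨n', hn'⟩ : ∃ n', xs.length = n' + 1 := ⟨xs.length - 1, by omega⟩
  have hA : (List.range xs.length).foldl (fun (dp : List Int) i =>
        (List.range i).foldl (fun (dp : List Int) j =>
            if PySem.Str.isIn (xs.getD j "") (xs.getD i "") then
              dp.set i (max (dp.getD i 0) (dp.getD j 0 + 1))
            else dp) dp) (List.replicate xs.length 1)
      = (List.range xs.length).map (bestP xs) := by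
    rw [outerA xs xs.length le_rfl]
    exact List.map_congr_left (fun k hk => by simp [List.mem_range.mp hk])
  simp only [hA]
  rw [outerB xs _ _ _ (memoOK_empty xs)]
  rw [hn', List.range_succ_eq_map, List.map_cons, PySem.List.max?_id_cons, List.foldl_map,
    List.foldl_cons]
  rw [show pureStep xs none 0 = some (bestP xs 0) from rfl, pureFold_some, List.foldl_map]
  rfl
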